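-- pv_equiv track=rewrite | github.com/ankitshah009/leetcode_python | graphs/1962-remove_stones_to_minimize_the_total.py | minStoneSum
-- ===== SOURCE A (Python) =====
-- from typing import List
-- import heapq
--
-- def minStoneSum(piles: List[int], k: int) -> int:
--     """
--     Use max heap to always reduce the largest pile.
--     """
--     # Create max heap (negate values)
--     heap = [-p for p in piles]
--     heapq.heapify(heap)
--
--     for _ in range(k):
--         largest = -heapq.heappop(heap)
--         removed = largest // 2
--         heapq.heappush(heap, -(largest - removed))
--
--     return -sum(heap)
-- ===== SOURCE B (Python) =====
-- def minStoneSum(piles, k):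
--     # Sort once (descending), then run the k operations as a two-queue merge:
--     # the current largest pile is either the next untouched pile or the oldest
--     # halved pile, since halved piles are produced in non-increasing order.
--     xs = sorted(piles, reverse=True)
--     halved = []
--     i = j = 0
--     for _ in range(k):
--         if j < len(halved) and (i >= len(xs) or halved[j] > xs[i]):
--             v, from_halved = halved[j], True
--         else:
--             v, from_halved = xs[i], False
--         w = v - v // 2
--         if w == v:
--             # the largest pile no longer shrinks, so nothing can change any more
--             break
--         if from_halved:
--             j += 1
--         else:
--             i += 1
--         halved.append(w)
--     return sum(xs[i:]) + sum(halved[j:])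
-- ===== Notes on version B (the rewrite author's own statement) =====
-- stated objective: alternative
-- what changed: Replaces A's max-heap (heapq) simulation by one descending sort plus a two-queue merge: each operation takes the larger of the next untouched pile and the oldest halved pile (halved piles are produced in non-increasing order), and stops early once the largest pile no longer shrinks; Pre_ only excludes the empty-piles-with-k>=1 inputs, on which both A (heappop from empty heap) and B (indexing the empty sorted list) raise IndexError.
import Mathlib
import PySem

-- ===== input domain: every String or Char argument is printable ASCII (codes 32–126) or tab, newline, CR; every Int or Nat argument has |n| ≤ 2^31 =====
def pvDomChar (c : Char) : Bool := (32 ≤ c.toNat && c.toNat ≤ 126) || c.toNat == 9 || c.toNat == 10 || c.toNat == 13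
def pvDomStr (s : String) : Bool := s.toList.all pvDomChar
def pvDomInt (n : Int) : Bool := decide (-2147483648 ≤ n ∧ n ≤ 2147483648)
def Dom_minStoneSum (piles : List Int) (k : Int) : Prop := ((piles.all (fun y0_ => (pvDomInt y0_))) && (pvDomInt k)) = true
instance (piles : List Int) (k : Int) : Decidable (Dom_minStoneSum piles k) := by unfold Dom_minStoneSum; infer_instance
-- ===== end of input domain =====

-- ===== PORT A =====
-- B replaces A's heap with one descending sort plus a two-queue merge and an early stop.
-- heapq is ported at contract level: the heap is the list of its elements, heappop removes a
-- minimum occurrence (which occurrence is irrelevant to the returned sum), heappush appends.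
def pvALoop : List Int → Nat → List Int
  | heap, 0 => heap
  | heap, n+1 =>
    match PySem.List.min? heap (fun y => y) with
    | none => heap   -- Python: heappop on empty raises IndexError; excluded by Pre_
    | some m =>
      let largest := -m
      let removed := PySem.Int.floordiv largest 2
      pvALoop (heap.erase m ++ [-(largest - removed)]) n

def minStoneSum (piles : List Int) (k : Int) : Int :=
  -(pvALoop (piles.map (fun p => -p)) k.toNat).sum

-- ===== PORT B =====
-- main loop of Source B; the pointers i / j only advance, so xs / halved here are the live
-- suffixes xs[i:] / halved[j:], and each exit point returns sum(xs[i:]) + sum(halved[j:])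
def pvBLoop : List Int → List Int → Nat → Int
  | xs, out, 0 => xs.sum + out.sum
  | [], [], _+1 => 0   -- Python: xs[i] raises IndexError here; excluded by Pre_
  | [], o :: ot, n+1 =>
    let w := o - PySem.Int.floordiv o 2
    if w = o then ([] : List Int).sum + (o :: ot).sum
    else pvBLoop [] (ot ++ [w]) n
  | x :: xt, [], n+1 =>
    let w := x - PySem.Int.floordiv x 2
    if w = x then (x :: xt).sum + ([] : List Int).sum
    else pvBLoop xt ([] ++ [w]) n
  | x :: xt, o :: ot, n+1 =>
    if o > x then
      let w := o - PySem.Int.floordiv o 2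
      if w = o then (x :: xt).sum + (o :: ot).sum
      else pvBLoop (x :: xt) (ot ++ [w]) n
    else
      let w := x - PySem.Int.floordiv x 2
      if w = x then (x :: xt).sum + (o :: ot).sum
      else pvBLoop xt ((o :: ot) ++ [w]) n

def minStoneSum_alt (piles : List Int) (k : Int) : Int :=
  pvBLoop (PySem.List.sorted piles (fun y => y) true) [] k.toNat

-- ===== PRECONDITION & SPEC =====
-- Pre_ excludes exactly the crash inputs: on empty piles with k ≥ 1 A raises IndexError
-- (heappop from an empty heap) and B raises IndexError too (indexing the empty list).
def Pre_minStoneSum (piles : List Int) (k : Int) : Prop := piles ≠ [] ∨ k ≤ 0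
instance (piles : List Int) (k : Int) : Decidable (Pre_minStoneSum piles k) := by unfold Pre_minStoneSum; infer_instance
def pvWitness_minStoneSum : List Int × Int := ([5, 4, 4], 2)
def Spec_minStoneSum (piles : List Int) (k : Int) (out : Int) : Prop := out = minStoneSum_alt piles k
instance (piles : List Int) (k : Int) (out : Int) : Decidable (Spec_minStoneSum piles k out) := by unfold Spec_minStoneSum; infer_instance

-- ===== CLAIM (what is proved, stated in full; the proofs are below) =====
def Claim_equal_minStoneSum : Prop := ∀ (piles : List Int) (k : Int), Dom_minStoneSum piles k → Pre_minStoneSum piles k → Spec_minStoneSum piles k (minStoneSum piles k)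

-- ===== LEMMAS AND PROOFS =====

lemma pv_sum_neg (l : List Int) : (l.map (fun a => -a)).sum = -l.sum := by
  induction l with
  | nil => simp
  | cons a t ih => simp [ih]; ring

-- a // 2 brackets, used for all the ceil(v/2) arithmetic below
lemma pv_floordiv2 (a : Int) :
    2 * PySem.Int.floordiv a 2 ≤ a ∧ a ≤ 2 * PySem.Int.floordiv a 2 + 1 := by
  have h1 := PySem.Int.floordiv_mul_add_mod a 2
  have h2 := PySem.Int.mod_nonneg a (show (0:Int) < 2 by norm_num)
  have h3 := PySem.Int.mod_lt a (show (0:Int) < 2 by norm_num)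
  omega

lemma pv_ceil_mono {a b : Int} (h : a ≤ b) :
    a - PySem.Int.floordiv a 2 ≤ b - PySem.Int.floordiv b 2 := by
  have ha := pv_floordiv2 a
  have hb := pv_floordiv2 b
  omega

-- Source B's stop test 'w == v' holds exactly when the pile is 0 or 1
lemma pv_freeze_iff (v : Int) : v - PySem.Int.floordiv v 2 = v ↔ 0 ≤ v ∧ v ≤ 1 := by
  have := pv_floordiv2 v
  omega

-- min? returns THE minimum value
lemma pv_min_char {l : List Int} {m x : Int}
    (hm : PySem.List.min? l (fun y => y) = some m)
    (hx : x ∈ l) (hall : ∀ y ∈ l, x ≤ y) : m = x := by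
  have h1 := PySem.List.min?_isMin hm x hx
  have h2 := hall m (PySem.List.min?_mem hm)
  omega

lemma pv_min_exists {l : List Int} (h : l ≠ []) :
    ∃ m, PySem.List.min? l (fun y => y) = some m := by
  cases hmm : PySem.List.min? l (fun y => y) with
  | none => exact absurd ((PySem.List.min?_eq_none_iff l _).mp hmm) h
  | some m => exact ⟨m, rfl⟩

-- A pops the negation of the maximum of the live values
lemma pv_m_eq {heap zs : List Int} {m v : Int}
    (hperm : (heap.map (fun a => -a)).Perm zs)
    (hm : PySem.List.min? heap (fun y => y) = some m)
    (hvmem : v ∈ zs) (hvmax : ∀ y ∈ zs, y ≤ v) : m = -v := by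
  obtain ⟨a, ha, hav⟩ := List.mem_map.mp (hperm.symm.subset hvmem)
  have h2 : m ≤ a := PySem.List.min?_isMin hm a ha
  have h3 : -m ∈ zs := hperm.subset (List.mem_map.mpr ⟨m, PySem.List.min?_mem hm, rfl⟩)
  have h4 : -m ≤ v := hvmax _ h3
  omega

lemma pv_sum_erase {l : List Int} {a : Int} (h : a ∈ l) : (l.erase a).sum = l.sum - a := by
  have := List.sum_erase h
  omega

-- one unfolding of A's loop
lemma pvA_step {heap : List Int} {m : Int} (n : Nat)
    (hm : PySem.List.min? heap (fun y => y) = some m) :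
    pvALoop heap (n+1) =
      pvALoop (heap.erase m ++ [-(-m - PySem.Int.floordiv (-m) 2)]) n := by
  conv_lhs => rw [pvALoop]
  rw [hm]

-- once A's heap minimum is 0 or -1 (maximum pile 0 or 1), A's steps keep the heap sum
lemma pvA_frozen : ∀ (n : Nat) (heap : List Int) (m : Int),
    PySem.List.min? heap (fun y => y) = some m → (m = 0 ∨ m = -1) →
    (pvALoop heap n).sum = heap.sum := by
  intro n
  induction n with
  | zero => intro heap m _ _; rfl
  | succ n ih =>
    intro heap m hm hm01
    have hmmem : m ∈ heap := PySem.List.min?_mem hm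
    have hx : -(-m - PySem.Int.floordiv (-m) 2) = m := by
      rcases hm01 with h | h <;> subst h <;> decide
    rw [pvA_step n hm, hx]
    have hne' : heap.erase m ++ [m] ≠ [] := by simp
    obtain ⟨m', hm'⟩ := pv_min_exists hne'
    have hmem' : m ∈ heap.erase m ++ [m] := by simp
    have hall' : ∀ y ∈ heap.erase m ++ [m], m ≤ y := by
      intro y hy
      rcases List.mem_append.mp hy with hy | hy
      · exact PySem.List.min?_isMin hm y (List.mem_of_mem_erase hy)
      · simp at hy; omega
    have heq : m' = m := pv_min_char hm' hmem' hall'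
    subst heq
    rw [ih _ _ hm' hm01]
    rw [List.sum_append, pv_sum_erase hmmem]
    simp

-- the early-stop exits: maximum pile 0 or 1, so A's remaining steps keep the sum
lemma pv_small {heap zs : List Int} {m v : Int} (n : Nat)
    (hm : PySem.List.min? heap (fun y => y) = some m) (hmv : m = -v)
    (h01 : 0 ≤ v ∧ v ≤ 1)
    (hperm : (heap.map (fun a => -a)).Perm zs) :
    zs.sum = -(pvALoop heap n).sum := by
  rw [pvA_frozen n heap m hm (by omega)]
  have := hperm.sum_eq
  rw [pv_sum_neg] at this
  omega

-- the merge invariant carried by pv_main: either every queued halved value dominates the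
-- next ceil-half of every live value (the regime with a pile ≥ 2), or all untouched piles
-- are negative and the queue is at most the single value just produced
def pvInv (xs out : List Int) : Prop :=
  (∀ o ∈ out, ∀ y ∈ xs ++ out, y - PySem.Int.floordiv y 2 ≤ o) ∨
  ((∀ x ∈ xs, x < 0) ∧ out.length ≤ 1 ∧ ∀ o ∈ out, o ≤ 0 ∧ ∀ x ∈ xs, x < o)

-- one consuming step in the first regime (chosen maximum v ≥ 2)
lemma pv_consume {heap : List Int} {m v : Int} (n : Nat) (xs' ot : List Int)
    (ih : ∀ (heap xs out : List Int), heap ≠ [] →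
      (heap.map (fun a => -a)).Perm (xs ++ out) →
      xs.Pairwise (fun a b => b ≤ a) →
      out.Pairwise (fun a b => b ≤ a) →
      pvInv xs out →
      pvBLoop xs out n = -(pvALoop heap n).sum)
    (hm : PySem.List.min? heap (fun y => y) = some m) (hmv : m = -v)
    (hv2 : 2 ≤ v)
    (hpe : ((heap.erase m).map (fun a => -a)).Perm (xs' ++ ot))
    (hxs' : xs'.Pairwise (fun a b => b ≤ a))
    (hot : ot.Pairwise (fun a b => b ≤ a))
    (hmax : ∀ y ∈ xs' ++ ot, y ≤ v)
    (hdom : ∀ p ∈ ot, v - PySem.Int.floordiv v 2 ≤ p) :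
    pvBLoop xs' (ot ++ [v - PySem.Int.floordiv v 2]) n = -(pvALoop heap (n+1)).sum := by
  set w : Int := v - PySem.Int.floordiv v 2 with hw
  have hfd := pv_floordiv2 v
  have hwb : 1 ≤ w ∧ w ≤ v := by omega
  have hpush : -(-m - PySem.Int.floordiv (-m) 2) = -w := by
    rw [hmv]; simp [hw]
  rw [pvA_step n hm, hpush]
  have hperm' : ((heap.erase m ++ [-w]).map (fun a => -a)).Perm (xs' ++ (ot ++ [w])) := by
    rw [List.map_append, ← List.append_assoc]
    simpa using hpe.append_right [w]
  have hyw : ∀ y ∈ xs' ++ (ot ++ [w]), y - PySem.Int.floordiv y 2 ≤ w := by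
    intro y hy
    rw [← List.append_assoc] at hy
    rcases List.mem_append.mp hy with hy | hy
    · exact le_trans (pv_ceil_mono (hmax y hy)) (by omega)
    · simp at hy; subst hy
      have := pv_floordiv2 w
      omega
  have hot' : (ot ++ [w]).Pairwise (fun a b => b ≤ a) := by
    refine List.pairwise_append.mpr ⟨hot, by simp, ?_⟩
    intro a ha b hb
    simp at hb; subst hb
    exact hdom a ha
  have h3' : ∀ p ∈ ot ++ [w], ∀ y ∈ xs' ++ (ot ++ [w]),
      y - PySem.Int.floordiv y 2 ≤ p := by
    intro p hp y hy
    rcases List.mem_append.mp hp with hp | hp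
    · exact le_trans (hyw y hy) (hdom p hp)
    · simp at hp; subst hp
      exact hyw y hy
  exact ih (heap.erase m ++ [-w]) xs' (ot ++ [w]) (by simp) hperm' hxs' hot' (Or.inl h3')

-- one consuming step in the second regime (chosen maximum v < 0; the queue just emptied)
lemma pv_consume_neg {heap : List Int} {m v : Int} (n : Nat) (xs' : List Int)
    (ih : ∀ (heap xs out : List Int), heap ≠ [] →
      (heap.map (fun a => -a)).Perm (xs ++ out) →
      xs.Pairwise (fun a b => b ≤ a) →
      out.Pairwise (fun a b => b ≤ a) →
      pvInv xs out →
      pvBLoop xs out n = -(pvALoop heap n).sum)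
    (hm : PySem.List.min? heap (fun y => y) = some m) (hmv : m = -v)
    (hneg : v < 0)
    (hpe : ((heap.erase m).map (fun a => -a)).Perm xs')
    (hxs' : xs'.Pairwise (fun a b => b ≤ a))
    (hmax : ∀ y ∈ xs', y ≤ v) :
    pvBLoop xs' [v - PySem.Int.floordiv v 2] n = -(pvALoop heap (n+1)).sum := by
  set w : Int := v - PySem.Int.floordiv v 2 with hw
  have hfd := pv_floordiv2 v
  have hwb : v < w ∧ w ≤ 0 := by omega
  have hpush : -(-m - PySem.Int.floordiv (-m) 2) = -w := by
    rw [hmv]; simp [hw]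
  rw [pvA_step n hm, hpush]
  have hperm' : ((heap.erase m ++ [-w]).map (fun a => -a)).Perm (xs' ++ [w]) := by
    rw [List.map_append]
    simpa using hpe.append_right [w]
  refine ih (heap.erase m ++ [-w]) xs' [w] (by simp) hperm' hxs' (by simp) (Or.inr ?_)
  refine ⟨fun x hx => by have := hmax x hx; omega, by simp, ?_⟩
  intro o ho
  simp at ho; subst ho
  exact ⟨by omega, fun x hx => by have := hmax x hx; omega⟩

-- main invariant: B's live suffixes hold a permutation of the negated heap, each sorted
-- non-increasingly, together with pvInv
lemma pv_main : ∀ (n : Nat) (heap xs out : List Int),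
    heap ≠ [] →
    (heap.map (fun a => -a)).Perm (xs ++ out) →
    xs.Pairwise (fun a b => b ≤ a) →
    out.Pairwise (fun a b => b ≤ a) →
    pvInv xs out →
    pvBLoop xs out n = -(pvALoop heap n).sum := by
  intro n
  induction n with
  | zero =>
    intro heap xs out _ hperm _ _ _
    rw [pvBLoop, pvALoop]
    have := hperm.sum_eq
    rw [pv_sum_neg, List.sum_append] at this
    omega
  | succ n ih =>
    intro heap xs out hne hperm hxs hout hinv
    obtain ⟨m, hm⟩ := pv_min_exists hne
    rcases xs with _ | ⟨x, xt⟩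
    · rcases out with _ | ⟨o, ot⟩
      · exact absurd (by simpa using hperm.length_eq) (by simpa using hne)
      · -- live values only in the halved queue; its front o is the maximum
        have homax : ∀ y ∈ ot, y ≤ o := (List.pairwise_cons.mp hout).1
        have hvmax : ∀ y ∈ ([] : List Int) ++ o :: ot, y ≤ o := by
          intro y hy; simp at hy
          rcases hy with h | h
          · omega
          · exact homax y h
        have hmv : m = -o := pv_m_eq hperm hm (by simp) hvmax
        rw [pvBLoop]
        by_cases hstop : o - PySem.Int.floordiv o 2 = o
        · rw [if_pos hstop]
          have hs := pv_small (n+1) hm hmv ((pv_freeze_iff o).mp hstop) hperm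
          simp at hs ⊢
          omega
        · rw [if_neg hstop]
          have h01 := (pv_freeze_iff o).not.mp hstop
          have hpe' : ((heap.erase m).map (fun a => -a)).Perm (([] : List Int) ++ ot) := by
            rw [List.map_erase neg_injective, hmv, neg_neg]
            simpa using hperm.erase o
          by_cases hneg : o < 0
          · -- queue must be the singleton [o]
            have hot0 : ot = [] := by
              rcases hinv with h3 | ⟨_, hlen, _⟩
              · exfalso
                have := h3 o (by simp) o (by simp)
                have := pv_floordiv2 o
                omega
              · simpa using hlen
            subst hot0
            simpa using pv_consume_neg n [] ih hm hmv hneg (by simpa using hpe')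
              (by simp) (by simp)
          · have hv2 : 2 ≤ o := by omega
            refine pv_consume n [] ot ih hm hmv hv2 hpe' (by simp)
              (List.Pairwise.of_cons hout) ?_ ?_
            · intro y hy
              exact hvmax y (by simp at hy ⊢; right; exact hy)
            · rcases hinv with h3 | ⟨_, _, hno⟩
              · intro p hp
                exact h3 p (by simp [hp]) o (by simp)
              · have := (hno o (by simp)).1
                omega
    · rcases out with _ | ⟨o, ot⟩
      · -- live values only in xs; its front x is the maximum
        have hxmax : ∀ y ∈ xt, y ≤ x := (List.pairwise_cons.mp hxs).1
        have hvmax : ∀ y ∈ (x :: xt) ++ ([] : List Int), y ≤ x := by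
          intro y hy; simp at hy
          rcases hy with h | h
          · omega
          · exact hxmax y h
        have hmv : m = -x := pv_m_eq hperm hm (by simp) hvmax
        rw [pvBLoop]
        by_cases hstop : x - PySem.Int.floordiv x 2 = x
        · rw [if_pos hstop]
          have hs := pv_small (n+1) hm hmv ((pv_freeze_iff x).mp hstop) hperm
          simp at hs ⊢
          omega
        · rw [if_neg hstop]
          have h01 := (pv_freeze_iff x).not.mp hstop
          have hpe' : ((heap.erase m).map (fun a => -a)).Perm xt := by
            rw [List.map_erase neg_injective, hmv, neg_neg]
            simpa using hperm.erase x
          by_cases hneg : x < 0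
          · simpa using pv_consume_neg n xt ih hm hmv hneg hpe'
              (List.Pairwise.of_cons hxs) hxmax
          · have hv2 : 2 ≤ x := by omega
            refine pv_consume n xt [] ih hm hmv hv2 (by simpa using hpe')
              (List.Pairwise.of_cons hxs) (by simp) ?_ (by simp)
            intro y hy
            exact hvmax y (by simp at hy ⊢; right; exact hy)
      · -- both queues nonempty: Source B compares the two fronts
        have hxmax : ∀ y ∈ xt, y ≤ x := (List.pairwise_cons.mp hxs).1
        have homax : ∀ y ∈ ot, y ≤ o := (List.pairwise_cons.mp hout).1
        rw [pvBLoop]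
        by_cases hox : o > x
        · rw [if_pos hox]
          have hvmax : ∀ y ∈ (x :: xt) ++ o :: ot, y ≤ o := by
            intro y hy; simp at hy
            rcases hy with h | h | h | h
            · omega
            · have := hxmax y h; omega
            · omega
            · exact homax y h
          have hmv : m = -o := pv_m_eq hperm hm (by simp) hvmax
          by_cases hstop : o - PySem.Int.floordiv o 2 = o
          · rw [if_pos hstop]
            have hs := pv_small (n+1) hm hmv ((pv_freeze_iff o).mp hstop) hperm
            simp [List.sum_append] at hs ⊢
            omega
          · rw [if_neg hstop]
            have h01 := (pv_freeze_iff o).not.mp hstop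
            have hnotin : o ∉ x :: xt := by
              intro hmem
              have hox' : o ≤ x := by
                rcases List.mem_cons.mp hmem with h | h
                · omega
                · exact hxmax o h
              omega
            have hpe' : ((heap.erase m).map (fun a => -a)).Perm ((x :: xt) ++ ot) := by
              rw [List.map_erase neg_injective, hmv, neg_neg]
              have h1 := hperm.erase o
              rw [List.erase_append_right _ hnotin] at h1
              simpa using h1
            by_cases hneg : o < 0
            · have hot0 : ot = [] := by
                rcases hinv with h3 | ⟨_, hlen, _⟩
                · exfalso
                  have := h3 o (by simp) o (by simp)
                  have := pv_floordiv2 o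
                  omega
                · simpa using hlen
              subst hot0
              refine pv_consume_neg n (x :: xt) ih hm hmv hneg (by simpa using hpe') hxs ?_
              intro y hy
              have := hvmax y (by simp at hy ⊢; tauto)
              omega
            · have hv2 : 2 ≤ o := by omega
              refine pv_consume n (x :: xt) ot ih hm hmv hv2 hpe' hxs
                (List.Pairwise.of_cons hout) ?_ ?_
              · intro y hy
                exact hvmax y (by simp at hy ⊢; tauto)
              · rcases hinv with h3 | ⟨_, _, hno⟩
                · intro p hp
                  exact h3 p (by simp [hp]) o (by simp)
                · have := (hno o (by simp)).1
                  omega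
        · rw [if_neg hox]
          have hvmax : ∀ y ∈ (x :: xt) ++ o :: ot, y ≤ x := by
            intro y hy; simp at hy
            rcases hy with h | h | h | h
            · omega
            · exact hxmax y h
            · omega
            · have := homax y h; omega
          have hmv : m = -x := pv_m_eq hperm hm (by simp) hvmax
          by_cases hstop : x - PySem.Int.floordiv x 2 = x
          · rw [if_pos hstop]
            have hs := pv_small (n+1) hm hmv ((pv_freeze_iff x).mp hstop) hperm
            simp [List.sum_append] at hs ⊢
            omega
          · rw [if_neg hstop]
            have h01 := (pv_freeze_iff x).not.mp hstop
            have hpe' : ((heap.erase m).map (fun a => -a)).Perm (xt ++ o :: ot) := by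
              rw [List.map_erase neg_injective, hmv, neg_neg]
              simpa using hperm.erase x
            by_cases hneg : x < 0
            · -- impossible: a queued value would have to be both < 0 and either ≥ 0 (regime 1)
              -- or strictly above the untouched front x ≥ o (regime 2)
              exfalso
              have hox' : o ≤ x := by omega
              rcases hinv with h3 | ⟨_, _, hno⟩
              · have := h3 o (by simp) o (by simp)
                have ho0 := hvmax o (by simp)
                have := pv_floordiv2 o
                omega
              · have := (hno o (by simp)).2 x (by simp)
                omega
            · have hv2 : 2 ≤ x := by omega
              refine pv_consume n xt (o :: ot) ih hm hmv hv2 hpe'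
                (List.Pairwise.of_cons hxs) hout ?_ ?_
              · intro y hy
                exact hvmax y (by simp at hy ⊢; tauto)
              · rcases hinv with h3 | ⟨_, _, hno⟩
                · intro p hp
                  exact h3 p hp x (by simp)
                · have := (hno o (by simp)).2 x (by simp)
                  omega

-- ===== VERDICT (by name: the statement is the Claim_ definition above) =====
theorem minStoneSum_spec : Claim_equal_minStoneSum := by
  intro piles k _ hpre
  unfold Spec_minStoneSum minStoneSum minStoneSum_alt
  rcases hpre with hne | hk
  · have hperm : ((piles.map (fun p => -p)).map (fun a => -a)).Perm
        ((PySem.List.sorted piles (fun y => y) true) ++ []) := by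
      simp [List.map_map]
      exact (PySem.List.sorted_perm piles (fun y => y) true).symm
    rw [pv_main k.toNat (piles.map (fun p => -p)) _ [] (by simpa using hne) hperm
      (PySem.List.sorted_pairwise_rev piles (fun y => y)) (by simp) (Or.inl (by simp))]
  · have h0 : k.toNat = 0 := Int.toNat_of_nonpos hk
    rw [h0]
    rw [pvBLoop, pvALoop, pv_sum_neg]
    have := (PySem.List.sorted_perm piles (fun y => y) true).sum_eq
    simp
    omega
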